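-- pv_equiv track=rewrite | github.com/studykit/studykit-marketplace | plugins/a4/scripts/validate_body.py | _strip_inline_code
-- ===== SOURCE A (Python) =====
-- def _strip_inline_code(line: str) -> str:
--     """Replace inline-code spans `...` with spaces so link regex won't match inside.
--
--     Length is preserved so column positions remain meaningful for any future
--     column-aware reporting.
--     """
--     out: list[str] = []
--     in_code = False
--     for ch in line:
--         if ch == "`":
--             in_code = not in_code
--             out.append(" ")
--         elif in_code:
--             out.append(" ")
--         else:
--             out.append(ch)
--     return "".join(out)
-- ===== SOURCE B (Python) =====
-- def _strip_inline_code(line: str) -> str: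
--     parts = line.split('`')
--     return ' '.join(p if i % 2 == 0 else ' ' * len(p) for i, p in enumerate(parts))
-- ===== Notes on version B (the rewrite author's own statement) =====
-- stated objective: idiomatic
-- what changed: Replaces A's per-character state-machine loop (toggling an in_code flag and appending char by char) with split on backticks, blanking odd-indexed parts, and joining with single spaces.
import Mathlib
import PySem

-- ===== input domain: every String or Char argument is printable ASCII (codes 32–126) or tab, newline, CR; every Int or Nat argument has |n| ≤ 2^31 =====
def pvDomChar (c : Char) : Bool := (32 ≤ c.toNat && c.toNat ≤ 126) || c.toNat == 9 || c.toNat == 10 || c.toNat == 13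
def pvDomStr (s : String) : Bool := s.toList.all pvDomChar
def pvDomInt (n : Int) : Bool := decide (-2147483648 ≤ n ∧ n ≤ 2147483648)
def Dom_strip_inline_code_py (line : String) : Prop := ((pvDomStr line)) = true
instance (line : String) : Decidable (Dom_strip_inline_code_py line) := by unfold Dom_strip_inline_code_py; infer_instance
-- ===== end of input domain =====

-- B replaces A's per-character in_code state machine by split-on-backtick / blank odd parts / join with spaces (idiomatic; same O(n) cost).

-- ===== PORT A =====
-- literal port of A: fold over the characters with state (in_code, out); "".join(out) = String.ofList
def strip_inline_code_py (line : String) : String :=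
  String.ofList
    (line.toList.foldl
      (fun (st : Bool × List Char) ch =>
        if ch = '`' then (!st.1, st.2 ++ [' '])
        else if st.1 then (st.1, st.2 ++ [' '])
        else (st.1, st.2 ++ [ch]))
      (false, [])).2

-- ===== PORT B =====
-- literal port of B: line.split('`') = List.splitOn '`'; enumerate+parity = mapIdx; ' '.join = Chars.join [' ']
def strip_inline_code_py_alt (line : String) : String :=
  String.ofList
    (PySem.Chars.join [' ']
      ((line.toList.splitOn '`').mapIdx
        (fun i p => if i % 2 = 0 then p else List.replicate p.length ' ')))

-- ===== PRECONDITION & SPEC =====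
def Spec_strip_inline_code_py (line : String) (out : String) : Prop := out = strip_inline_code_py_alt line
instance (line : String) (out : String) : Decidable (Spec_strip_inline_code_py line out) := by unfold Spec_strip_inline_code_py; infer_instance

-- ===== CLAIM (what is proved, stated in full; the proofs are below) =====
def Claim_equal_strip_inline_code_py : Prop := ∀ (line : String), Dom_strip_inline_code_py line → Spec_strip_inline_code_py line (strip_inline_code_py line)

-- ===== LEMMAS AND PROOFS =====

/-- the common specification: per-character result with the in-code flag -/
def pvSpecChars : List Char → Bool → List Char
  | [], _ => []
  | c :: cs, b =>
    if c = '`' then ' ' :: pvSpecChars cs (!b)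
    else if b then ' ' :: pvSpecChars cs b
    else c :: pvSpecChars cs b

/-- B's join/parity computation, rephrased with an explicit parity flag -/
def pvRend (b : Bool) : List (List Char) → List Char
  | [] => []
  | [p] => if b then List.replicate p.length ' ' else p
  | p :: q :: ps =>
    (if b then List.replicate p.length ' ' else p) ++ ' ' :: pvRend (!b) (q :: ps)

theorem pvFoldA (cs : List Char) : ∀ (b : Bool) (acc : List Char),
    (cs.foldl
      (fun (st : Bool × List Char) ch =>
        if ch = '`' then (!st.1, st.2 ++ [' '])
        else if st.1 then (st.1, st.2 ++ [' '])
        else (st.1, st.2 ++ [ch]))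
      (b, acc)).2 = acc ++ pvSpecChars cs b := by
  induction cs with
  | nil => intro b acc; simp [pvSpecChars]
  | cons c cs ih =>
    intro b acc
    by_cases hc : c = '`'
    · simp [pvSpecChars, hc, ih]
    · cases b
      · simp [pvSpecChars, hc, ih]
      · simp [pvSpecChars, hc, ih]

theorem pvRend_cons_head (b : Bool) (c : Char) (p : List Char) (rest : List (List Char)) :
    pvRend b ((c :: p) :: rest) = (if b then ' ' else c) :: pvRend b (p :: rest) := by
  cases rest <;> cases b <;> simp [pvRend, List.replicate_succ]

theorem pvSplitRend (cs : List Char) : ∀ (b : Bool),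
    pvRend b (cs.splitOn '`') = pvSpecChars cs b := by
  induction cs with
  | nil => intro b; cases b <;> simp [List.splitOn, pvRend, pvSpecChars]
  | cons c cs ih =>
    intro b
    have hne : cs.splitOn '`' ≠ [] := List.splitOnP_ne_nil _ _
    obtain ⟨p, rest, hsplit⟩ := List.exists_cons_of_ne_nil hne
    have hsplit' : List.splitOnP (fun x => x == '`') cs = p :: rest := hsplit
    by_cases hc : c = '`'
    · have h1 : (c :: cs).splitOn '`' = [] :: cs.splitOn '`' := by
        simp [List.splitOn, List.splitOnP_cons, hc]
      rw [h1, hsplit, show ([] : List Char) :: p :: rest = [] :: (p :: rest) from rfl]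
      simp only [pvRend]
      rw [← hsplit, ih (!b)]
      cases b <;> simp [pvSpecChars, hc]
    · have h1 : (c :: cs).splitOn '`' = (c :: p) :: rest := by
        simp [List.splitOn, List.splitOnP_cons, hc, hsplit']
      rw [h1, pvRend_cons_head, ← hsplit, ih b]
      cases b <;> simp [pvSpecChars, hc]

theorem pvJoinMapIdx (parts : List (List Char)) : ∀ (n : Nat),
    PySem.Chars.join [' ']
      (parts.mapIdx (fun i p => if (i + n) % 2 = 0 then p else List.replicate p.length ' '))
      = pvRend (decide (n % 2 = 1)) parts := by
  induction parts with
  | nil => intro n; simp [PySem.Chars.join_nil, pvRend]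
  | cons p ps ih =>
    intro n
    cases ps with
    | nil =>
      rcases Nat.mod_two_eq_zero_or_one n with h | h <;>
        simp [List.mapIdx_cons, PySem.Chars.join_singleton, pvRend, h]
    | cons q qs =>
      have hfun : (fun i =>
            (fun (i : Nat) (p : List Char) =>
              if (i + n) % 2 = 0 then p else List.replicate p.length ' ') (i + 1))
          = (fun (i : Nat) (p : List Char) =>
              if (i + (n + 1)) % 2 = 0 then p else List.replicate p.length ' ') := by
        funext i p
        have h : i + 1 + n = i + (n + 1) := by omega
        simp only [h]
      rw [List.mapIdx_cons, hfun]
      obtain ⟨y, ys, hy⟩ := List.exists_cons_of_ne_nil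
        (show (q :: qs).mapIdx (fun (i : Nat) (p : List Char) =>
            if (i + (n + 1)) % 2 = 0 then p else List.replicate p.length ' ') ≠ [] by
          simp [List.mapIdx_cons])
      rw [hy, PySem.Chars.join_cons_cons, ← hy, ih (n + 1)]
      have hpar : (decide ((n + 1) % 2 = 1)) = ! decide (n % 2 = 1) := by
        rcases Nat.mod_two_eq_zero_or_one n with h | h <;> simp [Nat.add_mod, h]
      rw [hpar]
      rcases Nat.mod_two_eq_zero_or_one n with h | h <;> simp [pvRend, h]

-- ===== VERDICT (by name: the statement is the Claim_ definition above) =====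
theorem strip_inline_code_py_spec : Claim_equal_strip_inline_code_py := by
  intro line _
  unfold Spec_strip_inline_code_py strip_inline_code_py strip_inline_code_py_alt
  rw [pvFoldA]
  have h := pvJoinMapIdx (line.toList.splitOn '`') 0
  simp only [Nat.add_zero] at h
  rw [h]
  simp only [show (decide (0 % 2 = 1)) = false by decide]
  rw [pvSplitRend]
  simp
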